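-- pv_equiv track=rewrite | github.com/NoviScl/AdvRACE | Attacks/Paraphrase/generate_benepar.py | extract_temp
-- ===== SOURCE A (Python) =====
-- def is_paren(tok):
--     return tok == ")" or tok == "("
--
-- def deleaf(tree):
--     nonleaves = ''
--     for w in str(tree).replace('\n', '').split():
--         w = w.replace('(', '( ').replace(')', ' )')
--         nonleaves += w + ' '
--
--     arr = nonleaves.split()
--     for n, i in enumerate(arr):
--         if n + 1 < len(arr):
--             tok1 = arr[n]
--             tok2 = arr[n + 1]
--             if not is_paren(tok1) and not is_paren(tok2):
--                 arr[n + 1] = ""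
--
--     nonleaves = " ".join(arr)
--     return nonleaves.split()
--
-- def extract_temp(parse):
-- 	'''
-- 	The input is a parse string without the ROOT at the beginning.
-- 	We extract the top 2 levels of the parse.
-- 	'''
-- 	lst = deleaf(parse)
-- 	level = 0
-- 	stack = []
-- 	for tok in lst:
-- 		if tok == '(':
-- 			level += 1
-- 		if level <= 2:
-- 			stack.append(tok)
-- 		if tok == ')':
-- 			level -= 1
-- 	stack.insert(0, 'ROOT')
-- 	stack.insert(0, '(')
-- 	stack.append(')')
-- 	stack.append('EOP')
-- 	return ' '.join(stack)
-- ===== SOURCE B (Python) =====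
-- def _emit(out, tok, level, prev_paren):
--     """Consume one token: update the bracket level, decide whether the token
--     survives (first of a run of non-paren tokens, and level <= 2), append it to out."""
--     if tok == '':
--         return level, prev_paren
--     if tok == '(':
--         level += 1
--         if level <= 2:
--             out.append('(')
--         return level, True
--     if tok == ')':
--         if level <= 2:
--             out.append(')')
--         return level - 1, True
--     # a word token: kept only if the previous token was a parenthesis
--     if prev_paren and level <= 2:
--         out.append(tok)
--     return level, False
--
--
-- def extract_temp(parse):
--     out = ['(', 'ROOT']
--     level = 0
--     prev_paren = True
--     buf = []
--     for ch in parse: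
--         if ch == '\n':
--             continue  # '\n' is deleted outright, it does not end a word
--         if ch.isspace():
--             level, prev_paren = _emit(out, ''.join(buf), level, prev_paren)
--             buf = []
--         elif ch == '(':
--             level, prev_paren = _emit(out, ''.join(buf) + '(', level, prev_paren)
--             buf = []
--         elif ch == ')':
--             level, prev_paren = _emit(out, ''.join(buf), level, prev_paren)
--             buf = [')']
--         else:
--             buf.append(ch)
--     level, prev_paren = _emit(out, ''.join(buf), level, prev_paren)
--     out.append(')')
--     out.append('EOP')
--     return ' '.join(out)
-- ===== Notes on version B (the rewrite author's own statement) =====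
-- stated objective: alternative
-- what changed: Replaces A's multi-pass pipeline (replace/split, per-word paren-splitting replaces, string re-concatenation, a second split, an index-mutating blanking pass, a join, a third split, then a level-counting filter pass) by a single character-level state machine that tokenizes, drops repeated word tokens and applies the depth-2 filter in one pass over the input string.
import Mathlib
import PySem

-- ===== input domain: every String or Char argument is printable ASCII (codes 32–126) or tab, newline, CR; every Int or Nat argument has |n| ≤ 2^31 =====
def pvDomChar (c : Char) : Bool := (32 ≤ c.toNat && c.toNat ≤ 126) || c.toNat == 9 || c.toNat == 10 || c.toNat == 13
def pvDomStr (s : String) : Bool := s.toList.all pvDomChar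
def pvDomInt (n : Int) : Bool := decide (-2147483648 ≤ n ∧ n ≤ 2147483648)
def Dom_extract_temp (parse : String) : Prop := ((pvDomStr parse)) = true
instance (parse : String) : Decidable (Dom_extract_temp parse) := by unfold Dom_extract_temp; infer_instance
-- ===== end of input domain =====

-- B replaces A's multi-pass pipeline (replace/split passes, blanking pass, join, re-split,
-- level-filter pass) by a single character-level state machine that tokenizes, deduplicates
-- and depth-filters in one pass; same output, a different algorithm of similar cost.

-- ===== PORT A =====
def isParenTok (t : List Char) : Bool := t == [')'] || t == ['(']

def extract_temp (parse : String) : String :=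
  let words := PySem.Chars.split₀ (PySem.Chars.replace parse.toList ['\n'] [])
  let nonleaves : List Char := words.foldl (fun acc w =>
      acc ++ (PySem.Chars.replace (PySem.Chars.replace w ['('] ['(', ' ']) [')'] [' ', ')']) ++ [' ']) []
  let arr := PySem.Chars.split₀ nonleaves
  let arr2 := (List.range arr.length).foldl (fun a n =>
      if n + 1 < a.length then
        if !isParenTok (a.getD n []) && !isParenTok (a.getD (n + 1) []) then a.set (n + 1) [] else a
      else a) arr
  let lst := PySem.Chars.split₀ (PySem.Chars.join [' '] arr2)
  let res := lst.foldl (fun (st : Int × List (List Char)) tok =>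
      let lv := if tok == ['('] then st.1 + 1 else st.1
      let stk := if lv ≤ 2 then st.2 ++ [tok] else st.2
      let lv2 := if tok == [')'] then lv - 1 else lv
      (lv2, stk)) (0, [])
  String.mk (PySem.Chars.join [' ']
    (['('] :: ['R','O','O','T'] :: res.2 ++ [[')'], ['E','O','P']]))

-- ===== PORT B =====
def emitB (out : List (List Char)) (tok : List Char) (level : Int) (prevParen : Bool) :
    List (List Char) × Int × Bool :=
  if tok == ([] : List Char) then (out, level, prevParen)
  else if tok == ['('] then
    (if level + 1 ≤ 2 then out ++ [['(']] else out, level + 1, true)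
  else if tok == [')'] then
    (if level ≤ 2 then out ++ [[')']] else out, level - 1, true)
  else
    (if prevParen && level ≤ 2 then out ++ [tok] else out, level, false)

def extract_temp_alt (parse : String) : String :=
  let st := parse.toList.foldl (fun (st : List (List Char) × Int × Bool × List Char) ch =>
      if ch == '\n' then st
      else if PySem.Chars.isspace ch then
        let e := emitB st.1 st.2.2.2 st.2.1 st.2.2.1
        (e.1, e.2.1, e.2.2, [])
      else if ch == '(' then
        let e := emitB st.1 (st.2.2.2 ++ ['(']) st.2.1 st.2.2.1
        (e.1, e.2.1, e.2.2, [])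
      else if ch == ')' then
        let e := emitB st.1 st.2.2.2 st.2.1 st.2.2.1
        (e.1, e.2.1, e.2.2, [')'])
      else (st.1, st.2.1, st.2.2.1, st.2.2.2 ++ [ch]))
    ([['('], ['R','O','O','T']], 0, true, [])
  let e := emitB st.1 st.2.2.2 st.2.1 st.2.2.1
  String.mk (PySem.Chars.join [' '] (e.1 ++ [[')'], ['E','O','P']]))

-- ===== PRECONDITION & SPEC =====
def Spec_extract_temp (parse : String) (out : String) : Prop := out = extract_temp_alt parse
instance (parse : String) (out : String) : Decidable (Spec_extract_temp parse out) := by unfold Spec_extract_temp; infer_instance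

-- ===== CLAIM (what is proved, stated in full; the proofs are below) =====
def Claim_equal_extract_temp : Prop := ∀ (parse : String), Dom_extract_temp parse → Spec_extract_temp parse (extract_temp parse)

-- ===== LEMMAS AND PROOFS =====

def plainC (c : Char) : Bool := !PySem.Chars.isspace c && c != '(' && c != ')'

def goodBuf : List Char → Bool
  | [] => true
  | c :: r => (c == ')' || plainC c) && r.all plainC

def tw (buf : List Char) : List Char → List (List Char)
  | [] => if buf = [] then [] else [buf]
  | c :: r =>
    if c = '(' then (buf ++ ['(']) :: tw [] r
    else if c = ')' then (if buf = [] then [] else [buf]) ++ tw [')'] r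
    else tw (buf ++ [c]) r

def TWA (w : List Char) : List Char → List (List Char)
  | [] => tw [] w
  | c :: r => if PySem.Chars.isspace c then tw [] w ++ TWA [] r else TWA (w ++ [c]) r

theorem plainC_spec (c : Char) (h : plainC c = true) :
    PySem.Chars.isspace c = false ∧ c ≠ '(' ∧ c ≠ ')' := by
  simp only [plainC, Bool.and_eq_true, Bool.not_eq_true', bne_iff_ne] at h
  exact ⟨h.1.1, h.1.2, h.2⟩

theorem tw_acc (m : List Char) : ∀ (buf x : List Char), (∀ c ∈ m, plainC c = true) →
    tw buf (m ++ x) = tw (buf ++ m) x := by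
  induction m with
  | nil => intro buf x _; simp
  | cons c t ih =>
    intro buf x h
    obtain ⟨_, h1, h2⟩ := plainC_spec c (h c (by simp))
    simp only [List.cons_append, tw, h1, h2, ite_false]
    rw [ih (buf ++ [c]) x (fun y hy => h y (by simp [hy]))]
    simp

theorem tw_load (buf m : List Char) (h : ∀ c ∈ m, plainC c = true) :
    tw buf m = tw (buf ++ m) [] := by
  simpa using tw_acc m buf [] h

theorem goodBuf_parts (c : Char) (m : List Char) (h : goodBuf (c :: m) = true) :
    (c = ')' ∨ plainC c = true) ∧ ∀ x ∈ m, plainC x = true := by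
  simp only [goodBuf, Bool.and_eq_true, Bool.or_eq_true, List.all_eq_true, beq_iff_eq] at h
  exact h

theorem tw_nil_good (buf : List Char) (h : goodBuf buf = true) :
    tw [] buf = if buf = [] then [] else [buf] := by
  cases buf with
  | nil => rfl
  | cons c m =>
    obtain ⟨hc, hm⟩ := goodBuf_parts c m h
    rcases hc with hc | hc
    · subst hc
      rw [show tw [] (')' :: m) = tw [')'] m by simp [tw], tw_load [')'] m hm]
      simp [tw]
    · obtain ⟨_, h1, h2⟩ := plainC_spec c hc
      rw [show tw [] (c :: m) = tw [c] m by simp [tw, h1, h2], tw_load [c] m hm]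
      simp [tw]

theorem tw_flush_lparen (buf x : List Char) (h : goodBuf buf = true) :
    tw [] (buf ++ '(' :: x) = (buf ++ ['(']) :: tw [] x := by
  cases buf with
  | nil => simp [tw]
  | cons c m =>
    obtain ⟨hc, hm⟩ := goodBuf_parts c m h
    have key : ∀ d : Char, (d = ')' ∨ plainC d = true) →
        tw [] (d :: (m ++ '(' :: x)) = ((d :: m) ++ ['(']) :: tw [] x := by
      intro d hd
      have hload : tw [d] (m ++ '(' :: x) = tw ([d] ++ m) ('(' :: x) := tw_acc m [d] _ hm
      have hstep : tw [] (d :: (m ++ '(' :: x)) = tw [d] (m ++ '(' :: x) := by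
        rcases hd with hd | hd
        · subst hd; simp [tw]
        · obtain ⟨_, h1, h2⟩ := plainC_spec d hd
          simp [tw, h1, h2]
      rw [hstep, hload]
      simp [tw]
    simpa using key c hc

theorem tw_flush_rparen (buf x : List Char) (h : goodBuf buf = true) :
    tw [] (buf ++ ')' :: x) = (if buf = [] then [] else [buf]) ++ tw [')'] x := by
  cases buf with
  | nil => simp [tw]
  | cons c m =>
    obtain ⟨hc, hm⟩ := goodBuf_parts c m h
    have key : ∀ d : Char, (d = ')' ∨ plainC d = true) →
        tw [] (d :: (m ++ ')' :: x)) = [d :: m] ++ tw [')'] x := by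
      intro d hd
      have hload : tw [d] (m ++ ')' :: x) = tw ([d] ++ m) (')' :: x) := tw_acc m [d] _ hm
      have hstep : tw [] (d :: (m ++ ')' :: x)) = tw [d] (m ++ ')' :: x) := by
        rcases hd with hd | hd
        · subst hd; simp [tw]
        · obtain ⟨_, h1, h2⟩ := plainC_spec d hd
          simp [tw, h1, h2]
      rw [hstep, hload]
      simp [tw]
    simpa using key c hc

theorem TWA_flush_lparen (r : List Char) : ∀ (w₂ buf : List Char), goodBuf buf = true →
    TWA (buf ++ '(' :: w₂) r = (buf ++ ['(']) :: TWA w₂ r := by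
  induction r with
  | nil =>
    intro w₂ buf h
    simp only [TWA]
    rw [show (buf ++ '(' :: w₂ : List Char) = buf ++ '(' :: w₂ from rfl, tw_flush_lparen buf w₂ h]
  | cons c r ih =>
    intro w₂ buf h
    by_cases hs : PySem.Chars.isspace c = true
    · simp only [TWA, hs, ite_true]
      rw [tw_flush_lparen buf w₂ h]
      simp
    · have hs' : PySem.Chars.isspace c = false := by simpa using hs
      simp only [TWA, hs', Bool.false_eq_true, ite_false]
      rw [show (buf ++ '(' :: w₂) ++ [c] = buf ++ '(' :: (w₂ ++ [c]) by simp]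
      exact ih (w₂ ++ [c]) buf h

theorem TWA_flush_rparen (r : List Char) : ∀ (w₂ buf : List Char), goodBuf buf = true →
    TWA (buf ++ ')' :: w₂) r = (if buf = [] then [] else [buf]) ++ TWA (')' :: w₂) r := by
  induction r with
  | nil =>
    intro w₂ buf h
    simp only [TWA]
    rw [tw_flush_rparen buf w₂ h]
    simp [tw]
  | cons c r ih =>
    intro w₂ buf h
    by_cases hs : PySem.Chars.isspace c = true
    · simp only [TWA, hs, ite_true]
      rw [tw_flush_rparen buf w₂ h]
      simp [tw]
    · have hs' : PySem.Chars.isspace c = false := by simpa using hs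
      simp only [TWA, hs', Bool.false_eq_true, ite_false]
      rw [show (buf ++ ')' :: w₂) ++ [c] = buf ++ ')' :: (w₂ ++ [c]) by simp,
        show (')' :: w₂ : List Char) ++ [c] = ')' :: (w₂ ++ [c]) by simp]
      exact ih (w₂ ++ [c]) buf h

theorem goodBuf_append_plain (buf : List Char) (c : Char) (h : goodBuf buf = true)
    (hc : plainC c = true) : goodBuf (buf ++ [c]) = true := by
  cases buf with
  | nil => simp [goodBuf, hc]
  | cons d m =>
    obtain ⟨hd, hm⟩ := goodBuf_parts d m h
    simp only [List.cons_append, goodBuf, Bool.and_eq_true, Bool.or_eq_true, List.all_eq_true,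
      beq_iff_eq]
    refine ⟨hd, ?_⟩
    intro x hx
    rcases List.mem_append.mp hx with hx | hx
    · exact hm x hx
    · simp at hx; subst hx; exact hc

def procT : List (List Char) → List (List Char) → Int → Bool → List (List Char) × Int × Bool
  | out, [], lv, pp => (out, lv, pp)
  | out, t :: ts, lv, pp =>
    procT (emitB out t lv pp).1 ts (emitB out t lv pp).2.1 (emitB out t lv pp).2.2

def ddT (pp : Bool) : List (List Char) → List (List Char)
  | [] => []
  | t :: ts => if isParenTok t then t :: ddT true ts else if pp then t :: ddT false ts else ddT false ts

theorem replace_go_single (a : Char) (new : List Char) :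
    ∀ (fuel : Nat) (l acc : List Char), l.length ≤ fuel →
      PySem.Chars.replace.go [a] new fuel l acc
        = acc.reverse ++ l.flatMap (fun c => if c = a then new else [c]) := by
  intro fuel
  induction fuel with
  | zero =>
    intro l acc h
    have : l = [] := by cases l <;> simp_all
    subst this
    simp [PySem.Chars.replace.go]
  | succ n ih =>
    intro l acc h
    cases l with
    | nil => simp [PySem.Chars.replace.go]
    | cons c t =>
      by_cases hca : c = a
      · subst hca
        have hpre : [c].isPrefixOf (c :: t) = true := by simp [List.isPrefixOf]
        simp only [PySem.Chars.replace.go, hpre, if_pos, List.length_cons, List.length_nil,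
          List.drop_succ_cons, List.drop_zero]
        rw [ih t (new.reverse ++ acc) (by simpa using Nat.le_of_succ_le_succ h)]
        simp
      · have hpre : [a].isPrefixOf (c :: t) = false := by
          simp [List.isPrefixOf]; exact fun hh => absurd hh.symm hca
        simp only [PySem.Chars.replace.go, hpre]
        rw [ih t (c :: acc) (by simpa using Nat.le_of_succ_le_succ h)]
        simp [hca]

theorem replace_single (a : Char) (new cs : List Char) :
    PySem.Chars.replace cs [a] new = cs.flatMap (fun c => if c = a then new else [c]) := by
  have := replace_go_single a new cs.length cs [] (le_refl _)
  simpa [PySem.Chars.replace] using this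

theorem flatMap_newline (cs : List Char) :
    cs.flatMap (fun c => if c = '\n' then [] else [c]) = cs.filter (· ≠ '\n') := by
  induction cs with
  | nil => simp
  | cons c t ih => by_cases h : c = '\n' <;> simp [h, ih]

theorem replace_newline (cs : List Char) :
    PySem.Chars.replace cs ['\n'] [] = cs.filter (· ≠ '\n') := by
  rw [replace_single, flatMap_newline]

def hsub (c : Char) : List Char := if c = '(' then ['(', ' '] else if c = ')' then [' ', ')'] else [c]

theorem expand_eq (w : List Char) :
    PySem.Chars.replace (PySem.Chars.replace w ['('] ['(', ' ']) [')'] [' ', ')'] = w.flatMap hsub := by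
  rw [replace_single, replace_single]
  induction w with
  | nil => simp
  | cons c t ih =>
    simp only [List.flatMap_cons, List.flatMap_append, ih]
    congr 1
    by_cases h1 : c = '(' <;> by_cases h2 : c = ')' <;> simp [hsub, h1, h2]

theorem go_word (w : List Char) : ∀ (cur : List Char) (acc : List (List Char)) (tail : List Char),
    (∀ c ∈ w, PySem.Chars.isspace c = false) →
    PySem.Chars.split₀.go (w ++ tail) cur acc
      = PySem.Chars.split₀.go tail (w.reverse ++ cur) acc := by
  induction w with
  | nil => intro cur acc tail _; simp
  | cons c t ih =>
    intro cur acc tail h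
    have hc : PySem.Chars.isspace c = false := h c (by simp)
    simp only [List.cons_append, PySem.Chars.split₀.go, hc, Bool.false_eq_true, if_neg,
      reduceCtorEq, ite_false]
    rw [ih (c :: cur) acc tail (fun x hx => h x (by simp [hx]))]
    simp

theorem go_expand (w : List Char) : ∀ (cur : List Char) (acc : List (List Char)) (tail : List Char),
    (∀ c ∈ w, PySem.Chars.isspace c = false) →
    PySem.Chars.split₀.go (w.flatMap hsub ++ ' ' :: tail) cur acc
      = PySem.Chars.split₀.go tail [] ((tw cur.reverse w).reverse ++ acc) := by
  induction w with
  | nil =>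
    intro cur acc tail _
    have hs : PySem.Chars.isspace ' ' = true := by decide
    by_cases hcur : cur = []
    · subst hcur; simp [PySem.Chars.split₀.go, hs, tw]
    · simp [PySem.Chars.split₀.go, hs, tw, hcur, List.isEmpty_iff]
  | cons c t ih =>
    intro cur acc tail h
    have hc : PySem.Chars.isspace c = false := h c (by simp)
    have ht : ∀ x ∈ t, PySem.Chars.isspace x = false := fun x hx => h x (by simp [hx])
    by_cases h1 : c = '('
    · subst h1
      rw [show (('(' :: t).flatMap hsub ++ ' ' :: tail)
            = '(' :: ' ' :: (t.flatMap hsub ++ ' ' :: tail) by simp [hsub]]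
      have hs : PySem.Chars.isspace ' ' = true := by decide
      have hlp : PySem.Chars.isspace '(' = false := by decide
      simp only [PySem.Chars.split₀.go, hlp, hs, Bool.false_eq_true, ite_false, ite_true,
        List.isEmpty_cons]
      rw [ih [] _ _ ht]
      simp [tw]
    · by_cases h2 : c = ')'
      · subst h2
        rw [show ((')' :: t).flatMap hsub ++ ' ' :: tail)
              = ' ' :: ')' :: (t.flatMap hsub ++ ' ' :: tail) by simp [hsub]]
        have hs : PySem.Chars.isspace ' ' = true := by decide
        have hrp : PySem.Chars.isspace ')' = false := by decide
        by_cases hcur : cur = []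
        · subst hcur
          simp only [PySem.Chars.split₀.go, hs, hrp, Bool.false_eq_true, ite_false, ite_true,
            List.isEmpty_nil]
          rw [ih [')'] _ _ ht]
          simp [tw]
        · simp only [PySem.Chars.split₀.go, hs, hrp, Bool.false_eq_true, ite_false, ite_true,
            List.isEmpty_iff, hcur]
          rw [ih [')'] _ _ ht]
          simp [tw, hcur]
      · rw [show ((c :: t).flatMap hsub ++ ' ' :: tail)
              = c :: (t.flatMap hsub ++ ' ' :: tail) by simp [hsub, h1, h2]]
        simp only [PySem.Chars.split₀.go, hc, Bool.false_eq_true, ite_false]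
        rw [ih (c :: cur) acc tail ht]
        simp [tw, h1, h2]

theorem go_words (ws : List (List Char)) : ∀ (acc : List (List Char)),
    (∀ w ∈ ws, ∀ c ∈ w, PySem.Chars.isspace c = false) →
    PySem.Chars.split₀.go ((ws.map (fun w => w.flatMap hsub ++ [' '])).flatten) [] acc
      = acc.reverse ++ ws.flatMap (fun w => tw [] w) := by
  induction ws with
  | nil => intro acc _; simp [PySem.Chars.split₀.go]
  | cons w rest ih =>
    intro acc h
    have hw := h w (by simp)
    rw [List.map_cons, List.flatten_cons, List.append_assoc,
      show ([' '] ++ (rest.map (fun w => w.flatMap hsub ++ [' '])).flatten)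
        = ' ' :: (rest.map (fun w => w.flatMap hsub ++ [' '])).flatten from rfl,
      go_expand w [] acc _ hw, ih _ (fun x hx => h x (by simp [hx]))]
    simp [tw]

theorem split₀_go_props (cs : List Char) : ∀ (cur : List Char) (acc : List (List Char)),
    (∀ c ∈ cur, PySem.Chars.isspace c = false) →
    (∀ w ∈ acc, w ≠ [] ∧ ∀ c ∈ w, PySem.Chars.isspace c = false) →
    ∀ w ∈ PySem.Chars.split₀.go cs cur acc, w ≠ [] ∧ ∀ c ∈ w, PySem.Chars.isspace c = false := by
  induction cs with
  | nil =>
    intro cur acc hcur hacc w hw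
    by_cases hc : cur = []
    · subst hc
      simp [PySem.Chars.split₀.go] at hw
      exact hacc w hw
    · simp [PySem.Chars.split₀.go, List.isEmpty_iff, hc] at hw
      rcases hw with hw | hw
      · exact hacc w hw
      · subst hw
        refine ⟨by simpa using hc, fun c hc' => hcur c (by simpa using hc')⟩
  | cons c t ih =>
    intro cur acc hcur hacc w hw
    by_cases hs : PySem.Chars.isspace c = true
    · by_cases hc : cur = []
      · subst hc
        simp only [PySem.Chars.split₀.go, hs, List.isEmpty_nil, ite_true] at hw
        exact ih [] acc (by simp) hacc w hw
      · simp only [PySem.Chars.split₀.go, hs, List.isEmpty_iff, hc, ite_true, ite_false] at hw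
        refine ih [] _ (by simp) ?_ w hw
        intro v hv
        rcases List.mem_cons.mp hv with hv | hv
        · subst hv
          exact ⟨by simpa using hc, fun x hx => hcur x (by simpa using hx)⟩
        · exact hacc v hv
    · simp only [PySem.Chars.split₀.go, hs, ite_false] at hw
      refine ih (c :: cur) acc ?_ hacc w hw
      intro x hx
      rcases List.mem_cons.mp hx with hx | hx
      · subst hx; simpa using hs
      · exact hcur x hx

theorem split₀_props (cs : List Char) :
    ∀ w ∈ PySem.Chars.split₀ cs, w ≠ [] ∧ ∀ c ∈ w, PySem.Chars.isspace c = false := by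
  intro w hw
  exact split₀_go_props cs [] [] (by simp) (by simp) w hw

theorem go_TWA (cs : List Char) : ∀ (cur : List Char) (acc : List (List Char)),
    (PySem.Chars.split₀.go cs cur acc).flatMap (tw [])
      = acc.reverse.flatMap (tw []) ++ TWA cur.reverse cs := by
  induction cs with
  | nil =>
    intro cur acc
    by_cases hc : cur = []
    · subst hc; simp [PySem.Chars.split₀.go, TWA, tw]
    · simp [PySem.Chars.split₀.go, List.isEmpty_iff, hc, TWA, tw]
  | cons c t ih =>
    intro cur acc
    by_cases hs : PySem.Chars.isspace c = true
    · by_cases hc : cur = []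
      · subst hc
        simp only [PySem.Chars.split₀.go, hs, List.isEmpty_nil, ite_true]
        rw [ih [] acc]
        simp [TWA, hs, tw]
      · simp only [PySem.Chars.split₀.go, hs, List.isEmpty_iff, hc, ite_true, ite_false]
        rw [ih [] _]
        simp [TWA, hs, tw, hc]
    · have hs' : PySem.Chars.isspace c = false := by simpa using hs
      simp only [PySem.Chars.split₀.go, hs', Bool.false_eq_true, ite_false]
      rw [ih (c :: cur) acc]
      simp [TWA, hs']

def markB (pp : Bool) : List (List Char) → List (List Char)
  | [] => []
  | t :: ts => (if pp || isParenTok t then t else []) :: markB (isParenTok t) ts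

def lastFlag (b : Bool) : List (List Char) → Bool
  | [] => b
  | t :: ts => lastFlag (isParenTok t) ts

theorem markB_length (xs : List (List Char)) : ∀ b, (markB b xs).length = xs.length := by
  induction xs with
  | nil => intro b; rfl
  | cons t ts ih => intro b; simp [markB, ih]

theorem markB_paren_getD (xs : List (List Char)) :
    ∀ b i, isParenTok ((markB b xs).getD i []) = isParenTok (xs.getD i []) := by
  induction xs with
  | nil => intro b i; rfl
  | cons t ts ih =>
    intro b i
    cases i with
    | zero =>
      by_cases h : (b || isParenTok t) = true
      · simp [markB, h]
      · have h' : (b || isParenTok t) = false := by simpa using h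
        have : isParenTok t = false := (Bool.or_eq_false_iff.mp h').2
        simp only [markB, h', List.getD_cons_zero, Bool.false_eq_true, ite_false]
        rw [this]
        rfl
    | succ n => simpa [markB] using ih (isParenTok t) n

theorem lastFlag_snoc (xs : List (List Char)) :
    ∀ b y, lastFlag b (xs ++ [y]) = isParenTok y := by
  induction xs with
  | nil => intro b y; rfl
  | cons t ts ih => intro b y; simp [lastFlag, ih]

theorem markB_snoc (xs : List (List Char)) :
    ∀ b y, markB b (xs ++ [y])
      = markB b xs ++ [if lastFlag b xs || isParenTok y then y else []] := by
  induction xs with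
  | nil => intro b y; simp [markB, lastFlag]
  | cons t ts ih => intro b y; simp [markB, lastFlag, ih]

theorem markB_mem (xs : List (List Char)) :
    ∀ b w, w ∈ markB b xs → w = [] ∨ w ∈ xs := by
  induction xs with
  | nil => intro b w h; simp [markB] at h
  | cons t ts ih =>
    intro b w h
    simp only [markB, List.mem_cons] at h
    rcases h with h | h
    · by_cases hb : (b || isParenTok t) = true
      · rw [hb] at h; simp at h; right; simp [h]
      · simp only [Bool.not_eq_true] at hb
        rw [hb] at h; simp at h; left; exact h
    · rcases ih _ w h with h' | h'
      · exact Or.inl h'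
      · exact Or.inr (List.mem_cons_of_mem _ h')

theorem filter_markB (xs : List (List Char)) : ∀ pp, (∀ t ∈ xs, t ≠ []) →
    (markB pp xs).filter (· ≠ []) = ddT pp xs := by
  induction xs with
  | nil => intro pp _; rfl
  | cons t ts ih =>
    intro pp h
    have ht : t ≠ [] := h t (by simp)
    have hts : ∀ x ∈ ts, x ≠ [] := fun x hx => h x (by simp [hx])
    have ihx : ∀ b, (markB b ts).filter (fun x => !decide (x = [])) = ddT b ts := by
      intro b
      have := ih b hts
      simpa [ne_eq] using this
    cases hp : isParenTok t with
    | true => simp [markB, ddT, hp, List.filter_cons, ht, ihx]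
    | false =>
      cases pp with
      | true => simp [markB, ddT, hp, List.filter_cons, ht, ihx]
      | false => simp [markB, ddT, hp, List.filter_cons, ihx]

theorem dedup_loop (arr : List (List Char)) : ∀ k, k ≤ arr.length →
    (List.range k).foldl (fun a n =>
      if n + 1 < a.length then
        if !isParenTok (a.getD n []) && !isParenTok (a.getD (n + 1) []) then a.set (n + 1) [] else a
      else a) arr
      = markB true (arr.take (k + 1)) ++ arr.drop (k + 1) := by
  intro k
  induction k with
  | zero =>
    intro _
    simp only [List.range_zero, List.foldl_nil]
    cases arr with
    | nil => simp [markB]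
    | cons t ts => simp [markB]
  | succ k ih =>
    intro hk
    have hk' : k ≤ arr.length := Nat.le_of_succ_le hk
    have hklt : k < arr.length := hk
    rw [List.range_succ, List.foldl_append, List.foldl_cons, List.foldl_nil, ih hk']
    have hmlen : (markB true (arr.take (k + 1))).length = min (k + 1) arr.length := by
      rw [markB_length, List.length_take]
    have hlen : (markB true (arr.take (k + 1)) ++ arr.drop (k + 1)).length = arr.length := by
      rw [List.length_append, hmlen, List.length_drop]; omega
    by_cases hkk : k + 1 < arr.length
    · have hmlen' : (markB true (arr.take (k + 1))).length = k + 1 := by rw [hmlen]; omega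
      have hgetk : isParenTok ((markB true (arr.take (k + 1)) ++ arr.drop (k + 1)).getD k [])
          = isParenTok (arr.getD k []) := by
        rw [List.getD_append _ _ _ _ (by omega), markB_paren_getD,
          List.getD_eq_getElem?_getD, List.getElem?_take_of_lt (by omega),
          ← List.getD_eq_getElem?_getD]
      have hgetk1 : (markB true (arr.take (k + 1)) ++ arr.drop (k + 1)).getD (k + 1) []
          = arr.getD (k + 1) [] := by
        rw [List.getD_eq_getElem?_getD, List.getElem?_append_right (by omega), hmlen']
        simp only [Nat.sub_self]
        rw [List.getElem?_drop, Nat.add_zero, ← List.getD_eq_getElem?_getD]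
      have htake : arr.take (k + 2) = arr.take (k + 1) ++ [arr.getD (k + 1) []] := by
        rw [List.take_succ, List.getD_eq_getElem?_getD,
          List.getElem?_eq_getElem (by omega : k + 1 < arr.length)]
        simp
      have htake1 : arr.take (k + 1) = arr.take k ++ [arr.getD k []] := by
        rw [List.take_succ, List.getD_eq_getElem?_getD,
          List.getElem?_eq_getElem (by omega : k < arr.length)]
        simp
      have hdrop : arr.drop (k + 1) = arr.getD (k + 1) [] :: arr.drop (k + 2) := by
        rw [List.drop_eq_getElem_cons (by omega : k + 1 < arr.length), List.getD_eq_getElem?_getD,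
          List.getElem?_eq_getElem (by omega : k + 1 < arr.length)]
        rfl
      have hflag : lastFlag true (arr.take (k + 1)) = isParenTok (arr.getD k []) := by
        rw [htake1, lastFlag_snoc]
      rw [htake, markB_snoc, hflag]
      simp only [hlen, hkk, if_pos, hgetk, hgetk1]
      by_cases hcond : (!isParenTok (arr.getD k []) && !isParenTok (arr.getD (k + 1) [])) = true
      · have hc' := hcond
        simp only [Bool.and_eq_true, Bool.not_eq_true'] at hc'
        obtain ⟨h1, h2⟩ := hc'
        rw [if_pos hcond, hdrop, List.set_append_right _ _ (by omega), hmlen']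
        rw [List.getD_eq_getElem?_getD] at h1 h2
        simp [h1, h2]
      · have hor : (isParenTok (arr.getD k []) || isParenTok (arr.getD (k + 1) [])) = true := by
          cases ha : isParenTok (arr.getD k []) with
          | true => rfl
          | false =>
            cases hb : isParenTok (arr.getD (k + 1) []) with
            | true => rfl
            | false => exact absurd (by rw [ha, hb]; rfl) hcond
        rw [if_neg hcond, hdrop, if_pos hor]
        simp
    · have hkeq : k + 1 = arr.length := by omega
      rw [hlen, if_neg (by omega)]
      rw [List.take_of_length_le (by omega), List.take_of_length_le (by omega),
        List.drop_of_length_le (by omega), List.drop_of_length_le (by omega)]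

theorem dedup_loop_final (arr : List (List Char)) :
    (List.range arr.length).foldl (fun a n =>
      if n + 1 < a.length then
        if !isParenTok (a.getD n []) && !isParenTok (a.getD (n + 1) []) then a.set (n + 1) [] else a
      else a) arr = markB true arr := by
  rw [dedup_loop arr arr.length (le_refl _)]
  rw [List.take_of_length_le (by omega), List.drop_of_length_le (by omega), List.append_nil]

theorem go_join (arr : List (List Char)) : ∀ (acc : List (List Char)),
    (∀ w ∈ arr, ∀ c ∈ w, PySem.Chars.isspace c = false) →
    PySem.Chars.split₀.go (PySem.Chars.join [' '] arr) [] acc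
      = acc.reverse ++ arr.filter (· ≠ []) := by
  induction arr with
  | nil => intro acc _; simp [PySem.Chars.join_nil, PySem.Chars.split₀.go]
  | cons w rest ih =>
    intro acc h
    have hw := h w (by simp)
    have hrest : ∀ v ∈ rest, ∀ c ∈ v, PySem.Chars.isspace c = false :=
      fun v hv => h v (by simp [hv])
    cases rest with
    | nil =>
      rw [PySem.Chars.join_singleton, show PySem.Chars.split₀.go w [] acc
          = PySem.Chars.split₀.go ([] : List Char) w.reverse acc by
            simpa using go_word w [] acc [] hw]
      by_cases hwz : w = []
      · subst hwz; simp [PySem.Chars.split₀.go]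
      · simp [PySem.Chars.split₀.go, List.isEmpty_iff, hwz, List.filter_cons, hwz]
    | cons w2 rest2 =>
      rw [PySem.Chars.join_cons_cons, List.append_assoc,
        go_word w [] acc _ hw]
      have hs : PySem.Chars.isspace ' ' = true := by decide
      by_cases hwz : w = []
      · subst hwz
        simp only [List.reverse_nil, List.append_nil, List.nil_append, List.singleton_append,
          PySem.Chars.split₀.go, hs, ite_true, List.isEmpty_nil]
        rw [ih acc hrest]
        simp [List.filter_cons]
      · simp only [List.append_nil, List.singleton_append, PySem.Chars.split₀.go, hs, ite_true,
          List.isEmpty_iff, List.reverse_eq_nil_iff, hwz, ite_false]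
        rw [ih _ hrest]
        simp [List.filter_cons, hwz]

theorem emitB_append (pre out : List (List Char)) (t : List Char) (lv : Int) (pp : Bool) :
    emitB (pre ++ out) t lv pp = (pre ++ (emitB out t lv pp).1, (emitB out t lv pp).2) := by
  unfold emitB
  split_ifs <;> simp

theorem procT_append (ts : List (List Char)) : ∀ (pre out : List (List Char)) (lv : Int) (pp : Bool),
    procT (pre ++ out) ts lv pp = (pre ++ (procT out ts lv pp).1, (procT out ts lv pp).2) := by
  induction ts with
  | nil => intro pre out lv pp; rfl
  | cons t ts ih =>
    intro pre out lv pp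
    simp only [procT, emitB_append]
    exact ih pre _ _ _

def AStep (st : Int × List (List Char)) (tok : List Char) : Int × List (List Char) :=
  let lv := if tok == ['('] then st.1 + 1 else st.1
  let stk := if lv ≤ 2 then st.2 ++ [tok] else st.2
  let lv2 := if tok == [')'] then lv - 1 else lv
  (lv2, stk)

theorem foldA_dd (ts : List (List Char)) : ∀ (out : List (List Char)) (lv : Int) (pp : Bool),
    (∀ t ∈ ts, t ≠ []) →
    (ddT pp ts).foldl AStep (lv, out)
      = ((procT out ts lv pp).2.1, (procT out ts lv pp).1) := by
  induction ts with
  | nil => intro out lv pp _; rfl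
  | cons t ts ih =>
    intro out lv pp h
    have ht : t ≠ [] := h t (by simp)
    have hts : ∀ x ∈ ts, x ≠ [] := fun x hx => h x (by simp [hx])
    by_cases h1 : t = ['(']
    · subst h1
      rw [show ddT pp (['('] :: ts) = ['('] :: ddT true ts by simp [ddT, isParenTok],
        List.foldl_cons,
        show AStep (lv, out) ['('] = (lv + 1, if lv + 1 ≤ 2 then out ++ [['(']] else out) by
          simp [AStep],
        ih _ _ _ hts,
        show procT out (['('] :: ts) lv pp
          = procT (if lv + 1 ≤ 2 then out ++ [['(']] else out) ts (lv + 1) true by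
            simp [procT, emitB]]
    · by_cases h2 : t = [')']
      · subst h2
        rw [show ddT pp ([')'] :: ts) = [')'] :: ddT true ts by simp [ddT, isParenTok],
          List.foldl_cons,
          show AStep (lv, out) [')'] = (lv - 1, if lv ≤ 2 then out ++ [[')']] else out) by
            simp [AStep],
          ih _ _ _ hts,
          show procT out ([')'] :: ts) lv pp
            = procT (if lv ≤ 2 then out ++ [[')']] else out) ts (lv - 1) true by
              simp [procT, emitB]]
      · have hp : isParenTok t = false := by simp [isParenTok, h1, h2]
        have hproc : procT out (t :: ts) lv pp
            = procT (if pp && lv ≤ 2 then out ++ [t] else out) ts lv false := by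
          simp [procT, emitB, ht, h1, h2]
        cases pp with
        | true =>
          rw [show ddT true (t :: ts) = t :: ddT false ts by simp [ddT, hp],
            List.foldl_cons,
            show AStep (lv, out) t = (lv, if lv ≤ 2 then out ++ [t] else out) by
              simp [AStep, h1, h2],
            ih _ _ _ hts, hproc]
          simp
        | false =>
          rw [show ddT false (t :: ts) = ddT false ts by simp [ddT, hp],
            ih _ _ _ hts, hproc]
          simp


-- B's loop body, named for the proofs (identical to the lambda in extract_temp_alt).
def BStep (st : List (List Char) × Int × Bool × List Char) (ch : Char) :
    List (List Char) × Int × Bool × List Char :=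
  if ch == '\n' then st
  else if PySem.Chars.isspace ch then
    let e := emitB st.1 st.2.2.2 st.2.1 st.2.2.1
    (e.1, e.2.1, e.2.2, [])
  else if ch == '(' then
    let e := emitB st.1 (st.2.2.2 ++ ['(']) st.2.1 st.2.2.1
    (e.1, e.2.1, e.2.2, [])
  else if ch == ')' then
    let e := emitB st.1 st.2.2.2 st.2.1 st.2.2.1
    (e.1, e.2.1, e.2.2, [')'])
  else (st.1, st.2.1, st.2.2.1, st.2.2.2 ++ [ch])

theorem B_run (cs : List Char) : ∀ (out : List (List Char)) (lv : Int) (pp : Bool) (buf : List Char),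
    goodBuf buf = true →
    (emitB (cs.foldl BStep (out, lv, pp, buf)).1 (cs.foldl BStep (out, lv, pp, buf)).2.2.2
        (cs.foldl BStep (out, lv, pp, buf)).2.1 (cs.foldl BStep (out, lv, pp, buf)).2.2.1).1
      = (procT out (TWA buf (cs.filter (· ≠ '\n'))) lv pp).1 := by
  induction cs with
  | nil =>
    intro out lv pp buf h
    simp only [List.foldl_nil, List.filter_nil, TWA]
    rw [tw_nil_good buf h]
    by_cases hb : buf = []
    · subst hb; simp [procT, emitB]
    · simp only [hb, ite_false]
      simp [procT]
  | cons c r ih =>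
    intro out lv pp buf h
    by_cases hnl : c = '\n'
    · subst hnl
      rw [List.foldl_cons, show BStep (out, lv, pp, buf) '\n' = (out, lv, pp, buf) by
        simp [BStep]]
      rw [ih out lv pp buf h]
      simp
    · by_cases hs : PySem.Chars.isspace c = true
      · rw [List.foldl_cons, show BStep (out, lv, pp, buf) c
            = ((emitB out buf lv pp).1, (emitB out buf lv pp).2.1, (emitB out buf lv pp).2.2, []) by
              simp [BStep, hnl, hs]]
        rw [ih _ _ _ [] rfl]
        rw [show (c :: r).filter (· ≠ '\n') = c :: r.filter (· ≠ '\n') by simp [hnl]]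
        simp only [TWA, hs, ite_true]
        rw [tw_nil_good buf h]
        by_cases hb : buf = []
        · subst hb
          simp [procT, emitB]
        · simp only [hb, ite_false, List.singleton_append, procT]
      · have hs' : PySem.Chars.isspace c = false := by simpa using hs
        rw [show (c :: r).filter (· ≠ '\n') = c :: r.filter (· ≠ '\n') by simp [hnl]]
        by_cases hlp : c = '('
        · subst hlp
          rw [List.foldl_cons, show BStep (out, lv, pp, buf) '('
              = ((emitB out (buf ++ ['(']) lv pp).1, (emitB out (buf ++ ['(']) lv pp).2.1,
                 (emitB out (buf ++ ['(']) lv pp).2.2, []) by simp [BStep, hs']]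
          rw [ih _ _ _ [] rfl]
          simp only [TWA, hs', Bool.false_eq_true, ite_false]
          rw [show buf ++ ['('] = buf ++ '(' :: [] from rfl, TWA_flush_lparen _ [] buf h]
          simp only [procT]
        · by_cases hrp : c = ')'
          · subst hrp
            rw [List.foldl_cons, show BStep (out, lv, pp, buf) ')'
                = ((emitB out buf lv pp).1, (emitB out buf lv pp).2.1,
                   (emitB out buf lv pp).2.2, [')']) by simp [BStep, hs']]
            rw [ih _ _ _ [')'] (by decide)]
            simp only [TWA, hs', Bool.false_eq_true, ite_false]
            rw [show buf ++ [')'] = buf ++ ')' :: [] from rfl, TWA_flush_rparen _ [] buf h]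
            by_cases hb : buf = []
            · subst hb; simp [procT, emitB]
            · simp only [hb, ite_false, List.singleton_append, procT]
          · have hplain : plainC c = true := by
              simp [plainC, hs', hlp, hrp]
            rw [List.foldl_cons, show BStep (out, lv, pp, buf) c
                = (out, lv, pp, buf ++ [c]) by simp [BStep, hnl, hs', hlp, hrp]]
            rw [ih _ _ _ (buf ++ [c]) (goodBuf_append_plain buf c h hplain)]
            simp only [TWA, hs', Bool.false_eq_true, ite_false]

theorem foldl_build (f : List Char → List Char) (ws : List (List Char)) : ∀ (acc0 : List Char),
    ws.foldl (fun acc w => acc ++ f w ++ [' ']) acc0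
      = acc0 ++ (ws.map (fun w => f w ++ [' '])).flatten := by
  induction ws with
  | nil => intro acc0; simp
  | cons w rest ih => intro acc0; rw [List.foldl_cons, ih]; simp

theorem main_eq (parse : String) : extract_temp parse = extract_temp_alt parse := by
  unfold extract_temp extract_temp_alt
  simp only []
  -- name the '\n'-free character list
  have hrep : PySem.Chars.replace parse.toList ['\n'] [] = parse.toList.filter (· ≠ '\n') :=
    replace_newline _
  rw [hrep]
  set cs' : List Char := parse.toList.filter (· ≠ '\n') with hcs'
  -- words and their properties
  have hwprops : ∀ w ∈ PySem.Chars.split₀ cs', w ≠ [] ∧ ∀ c ∈ w, PySem.Chars.isspace c = false :=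
    split₀_props cs'
  -- the nonleaves string
  rw [foldl_build (fun w => PySem.Chars.replace (PySem.Chars.replace w ['('] ['(', ' '])
    [')'] [' ', ')']) (PySem.Chars.split₀ cs') []]
  simp only [expand_eq, List.nil_append]
  -- arr = tokens
  have harr : PySem.Chars.split₀
      (((PySem.Chars.split₀ cs').map (fun w => w.flatMap hsub ++ [' '])).flatten)
      = TWA [] cs' := by
    have h1 : PySem.Chars.split₀
        (((PySem.Chars.split₀ cs').map (fun w => w.flatMap hsub ++ [' '])).flatten)
        = (PySem.Chars.split₀ cs').flatMap (fun w => tw [] w) := by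
      show PySem.Chars.split₀.go _ [] [] = _
      rw [go_words (PySem.Chars.split₀ cs') [] (fun w hw => (hwprops w hw).2)]
      simp
    have h2 : (PySem.Chars.split₀ cs').flatMap (fun w => tw [] w) = TWA [] cs' := by
      have := go_TWA cs' [] []
      simpa [PySem.Chars.split₀] using this
    rw [h1, h2]
  -- token list properties
  have htokprops : ∀ w ∈ PySem.Chars.split₀
      (((PySem.Chars.split₀ cs').map (fun w => w.flatMap hsub ++ [' '])).flatten),
      w ≠ [] ∧ ∀ c ∈ w, PySem.Chars.isspace c = false := split₀_props _
  set arr : List (List Char) := PySem.Chars.split₀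
      (((PySem.Chars.split₀ cs').map (fun w => w.flatMap hsub ++ [' '])).flatten) with harrdef
  -- the blanking loop
  rw [dedup_loop_final arr]
  -- join then split removes the blanks, giving the deduplicated token list
  have hjoin : PySem.Chars.split₀ (PySem.Chars.join [' '] (markB true arr)) = ddT true arr := by
    have hm : ∀ w ∈ markB true arr, ∀ c ∈ w, PySem.Chars.isspace c = false := by
      intro w hw
      rcases markB_mem arr true w hw with h | h
      · subst h; intro c hc; cases hc
      · exact (htokprops w h).2
    show PySem.Chars.split₀.go _ [] [] = _
    rw [go_join (markB true arr) [] hm]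
    simp only [List.reverse_nil, List.nil_append]
    exact filter_markB arr true (fun t ht => (htokprops t ht).1)
  rw [hjoin]
  -- the final level-counting fold
  rw [show (fun (st : Int × List (List Char)) tok =>
      let lv := if tok == ['('] then st.1 + 1 else st.1
      let stk := if lv ≤ 2 then st.2 ++ [tok] else st.2
      let lv2 := if tok == [')'] then lv - 1 else lv
      (lv2, stk)) = AStep from rfl]
  rw [foldA_dd arr [] 0 true (fun t ht => (htokprops t ht).1)]
  -- B's side
  rw [show (fun (st : List (List Char) × Int × Bool × List Char) ch =>
      if ch == '\n' then st
      else if PySem.Chars.isspace ch then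
        let e := emitB st.1 st.2.2.2 st.2.1 st.2.2.1
        (e.1, e.2.1, e.2.2, [])
      else if ch == '(' then
        let e := emitB st.1 (st.2.2.2 ++ ['(']) st.2.1 st.2.2.1
        (e.1, e.2.1, e.2.2, [])
      else if ch == ')' then
        let e := emitB st.1 st.2.2.2 st.2.1 st.2.2.1
        (e.1, e.2.1, e.2.2, [')'])
      else (st.1, st.2.1, st.2.2.1, st.2.2.2 ++ [ch])) = BStep from rfl]
  rw [B_run parse.toList [['('], ['R','O','O','T']] 0 true [] rfl]
  rw [← hcs', ← harr]
  rw [show ([['('], ['R','O','O','T']] : List (List Char))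
      = [['('], ['R','O','O','T']] ++ [] from rfl, procT_append]
  simp

-- ===== VERDICT (by name: the statement is the Claim_ definition above) =====
theorem extract_temp_spec : Claim_equal_extract_temp := by
  intro parse _
  unfold Spec_extract_temp
  exact main_eq parse
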